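-- pv_equiv track=rewrite | github.com/dipenR/ngram-text-generator | a3_Rupani_112321338.py | createTrigrams
-- ===== SOURCE A (Python) =====
-- def createTrigrams(data):
--     trigrams = {}
--     for d in data:
--         words = d.split()
--         for wi in range(len(words)-2):
--             if (words[wi], words[wi+1]) in trigrams.keys():
--                 trigrams[(words[wi], words[wi+1])][words[wi+2]] = trigrams[(words[wi], words[wi+1])].get(words[wi+2], 0) + 1
--             else:
--                 trigrams[(words[wi], words[wi+1])] = {}
--                 trigrams[(words[wi], words[wi+1])][words[wi+2]] = trigrams[(words[wi], words[wi+1])].get(words[wi+2], 0) + 1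
--     return trigrams
-- ===== SOURCE B (Python) =====
-- def createTrigrams(data):
--     # phase 1: group the third words of every trigram by their leading pair
--     groups = {}
--     for d in data:
--         w = d.split()
--         for (a, b, c) in zip(w, w[1:], w[2:]):
--             groups.setdefault((a, b), []).append(c)
--     # phase 2: turn each group into a dict of counts (first-occurrence order)
--     return {p: {c: thirds.count(c) for c in dict.fromkeys(thirds)}
--             for p, thirds in groups.items()}
-- ===== Notes on version B (the rewrite author's own statement) =====
-- stated objective: alternative
-- what changed: Replaces A's single incremental build of nested count-dicts (index loop with a membership branch updating counts in place) by two differently-shaped passes: first group the third word of every trigram (obtained by zipping the word list with its two shifted copies) into a flat dict of lists keyed by the leading pair, then a comprehension turns each group into its count dict via dedupe-and-count.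
import Mathlib
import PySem

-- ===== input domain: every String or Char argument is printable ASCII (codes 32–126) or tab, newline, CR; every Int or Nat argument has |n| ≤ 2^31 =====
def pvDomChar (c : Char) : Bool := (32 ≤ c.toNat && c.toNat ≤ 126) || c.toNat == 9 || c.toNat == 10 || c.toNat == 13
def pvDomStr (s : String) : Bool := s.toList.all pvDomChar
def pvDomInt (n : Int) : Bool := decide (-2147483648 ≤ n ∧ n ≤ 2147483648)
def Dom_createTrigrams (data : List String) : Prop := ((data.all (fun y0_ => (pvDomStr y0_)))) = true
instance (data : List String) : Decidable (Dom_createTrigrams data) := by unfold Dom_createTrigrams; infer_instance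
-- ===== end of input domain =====

-- B replaces A's incremental nested count-dict build with two passes: group trigram thirds
-- by leading pair, then count each group (alternative decomposition, no speed claim).

-- ===== PORT A =====
-- one step of A's inner loop body over the word index wi (words[wi] is always in range,
-- so pyGet?.getD "" is exact)
def ctA_body (words : List String)
    (trigrams : PySem.Dict (String × String) (PySem.Dict String Int)) (wi : Int) :
    PySem.Dict (String × String) (PySem.Dict String Int) :=
  let w1 := PySem.List.pyGetD words wi ""
  let w2 := PySem.List.pyGetD words (wi + 1) ""
  let w3 := PySem.List.pyGetD words (wi + 2) ""
  if trigrams.contains (w1, w2) then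
    let inner := trigrams.getD (w1, w2) PySem.Dict.empty
    trigrams.insert (w1, w2) (inner.insert w3 (inner.getD w3 0 + 1))
  else
    let trigrams1 := trigrams.insert (w1, w2) PySem.Dict.empty
    let inner := trigrams1.getD (w1, w2) PySem.Dict.empty
    trigrams1.insert (w1, w2) (inner.insert w3 (inner.getD w3 0 + 1))

def createTrigrams (data : List String) : List (String × String × List (String × Int)) :=
  let trigrams : PySem.Dict (String × String) (PySem.Dict String Int) :=
    data.foldl (fun trigrams d =>
      let words := PySem.Str.split₀ d
      (PySem.List.pyRange 0 ((words.length : Int) - 2) 1).foldl (ctA_body words) trigrams)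
      PySem.Dict.empty
  trigrams.items.map (fun p => (p.1.1, p.1.2, p.2.items))

-- ===== PORT B =====
-- zip(w, w[1:], w[2:]) (w[1:]/w[2:] on a list are drop 1 / drop 2)
def ctB_triples (w : List String) : List (String × String × String) :=
  w.zip ((w.drop 1).zip (w.drop 2))

-- groups.setdefault((a,b), []).append(c)  ≡  groups[(a,b)] = groups.get((a,b), []) + [c]
-- (same key position); {c: thirds.count(c) for c in dict.fromkeys(thirds)} is a fold of
-- inserts over the distinct elements of thirds in first-occurrence order.
def createTrigrams_alt (data : List String) : List (String × String × List (String × Int)) :=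
  let groups : PySem.Dict (String × String) (List String) :=
    data.foldl (fun groups d =>
      let w := PySem.Str.split₀ d
      (ctB_triples w).foldl
        (fun groups t => groups.modify (t.1, t.2.1) [] (· ++ [t.2.2])) groups)
      PySem.Dict.empty
  let trigrams : PySem.Dict (String × String) (PySem.Dict String Int) :=
    groups.items.foldl (fun out p =>
      out.insert p.1 ((PySem.Set.ofList p.2).foldl
        (fun d c => d.insert c ((PySem.List.count p.2 c : Int))) PySem.Dict.empty))
      PySem.Dict.empty
  trigrams.items.map (fun p => (p.1.1, p.1.2, p.2.items))

-- ===== PRECONDITION & SPEC =====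
def Spec_createTrigrams (data : List String) (out : List (String × String × List (String × Int))) : Prop := out = createTrigrams_alt data
instance (data : List String) (out : List (String × String × List (String × Int))) : Decidable (Spec_createTrigrams data out) := by unfold Spec_createTrigrams; infer_instance

-- ===== CLAIM (what is proved, stated in full; the proofs are below) =====
def Claim_equal_createTrigrams : Prop := ∀ (data : List String), Dom_createTrigrams data → Spec_createTrigrams data (createTrigrams data)

-- ===== LEMMAS AND PROOFS =====

-- abbreviations used only by the proofs
def ctPr (t : String × String × String) : String × String := (t.1, t.2.1)
def ctTh (t : String × String × String) : String := t.2.2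
def ctTS (data : List String) : List (String × String × String) :=
  data.flatMap (fun d => ctB_triples (PySem.Str.split₀ d))
def ctThirds (ts : List (String × String × String)) (p : String × String) : List String :=
  (ts.filter (fun t => ctPr t == p)).map ctTh
def ctInner (ths : List String) : PySem.Dict String Int :=
  PySem.Dict.mk ((PySem.Set.ofList ths).map (fun c => (c, (PySem.List.count ths c : Int))))
def ctCF (ts : List (String × String × String)) :
    PySem.Dict (String × String) (PySem.Dict String Int) :=
  PySem.Dict.mk ((PySem.Set.ofList (ts.map ctPr)).map
    (fun p => (p, ctInner (ctThirds ts p))))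
-- the canonical per-triple step both of A's branches reduce to
def ctNAdd (tr : PySem.Dict (String × String) (PySem.Dict String Int))
    (t : String × String × String) : PySem.Dict (String × String) (PySem.Dict String Int) :=
  let i := tr.getD (ctPr t) PySem.Dict.empty
  tr.insert (ctPr t) (i.insert (ctTh t) (i.getD (ctTh t) 0 + 1))

theorem ct_foldl_foldl_flatMap {α β γ : Type} (l : List α) (h : α → List β)
    (g : γ → β → γ) (init : γ) :
    l.foldl (fun acc d => (h d).foldl g acc) init = (l.flatMap h).foldl g init := by
  induction l generalizing init with
  | nil => rfl
  | cons x xs ih => simp [List.flatMap_cons, List.foldl_append, ih]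

-- index triples = zip triples
theorem ct_idx_triples (ws : List String) :
    (List.range (ws.length - 2)).map
      (fun k => (ws.getD k "", ws.getD (k+1) "", ws.getD (k+2) "")) = ctB_triples ws := by
  induction ws with
  | nil => rfl
  | cons a t ih =>
    match t with
    | [] => rfl
    | [b] => rfl
    | b :: c :: l =>
      have hlen : (a :: b :: c :: l).length - 2 = ((b :: c :: l).length - 2) + 1 := by
        simp
      rw [hlen, List.range_succ_eq_map, List.map_cons, List.map_map]
      have : ((fun k => ((a :: b :: c :: l).getD k "", (a :: b :: c :: l).getD (k+1) "",
          (a :: b :: c :: l).getD (k+2) "")) ∘ (· + 1))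
          = fun k => ((b :: c :: l).getD k "", (b :: c :: l).getD (k+1) "",
            (b :: c :: l).getD (k+2) "") := by
        funext k; simp [List.getD]
      rw [this, ih]
      rfl

-- A's body = canonical step
theorem ct_body_eq (words : List String) (tr : PySem.Dict (String × String) (PySem.Dict String Int))
    (t : String × String × String) (wi : Int)
    (h1 : PySem.List.pyGetD words wi "" = t.1)
    (h2 : PySem.List.pyGetD words (wi+1) "" = t.2.1)
    (h3 : PySem.List.pyGetD words (wi+2) "" = t.2.2) :
    ctA_body words tr wi = ctNAdd tr t := by
  obtain ⟨w1, w2, w3⟩ := t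
  simp only [ctA_body, ctNAdd, ctPr, ctTh] at *
  rw [h1, h2, h3]
  by_cases h : tr.contains (w1, w2) = true
  · simp [h]
  · rw [if_neg h]
    rw [PySem.Dict.getD_insert_self, PySem.Dict.insert_insert_self,
      PySem.Dict.getD_of_not_contains tr PySem.Dict.empty (by simpa using h)]

-- A's inner range loop = fold of the canonical step over the zip triples
theorem ct_range_fold (words : List String)
    (tr : PySem.Dict (String × String) (PySem.Dict String Int)) :
    (PySem.List.pyRange 0 ((words.length : Int) - 2) 1).foldl (ctA_body words) tr
      = (ctB_triples words).foldl ctNAdd tr := by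
  rw [PySem.List.pyRange_one]
  have hn : ((words.length : Int) - 2 - 0).toNat = words.length - 2 := by omega
  rw [hn, List.foldl_map, ← ct_idx_triples words, List.foldl_map]
  congr 1
  funext tr k
  apply ct_body_eq
  · simp
  · have : (0:Int) + (k:Int) + 1 = ((k+1 : Nat) : Int) := by push_cast; ring
    rw [this, PySem.List.pyGetD_natCast]
  · have : (0:Int) + (k:Int) + 2 = ((k+2 : Nat) : Int) := by push_cast; ring
    rw [this, PySem.List.pyGetD_natCast]

-- counting step
theorem ct_inner_step (ths : List String) (c : String) :
    (ctInner ths).insert c ((ctInner ths).getD c 0 + 1) = ctInner (ths ++ [c]) := by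
  have hkeys : (ctInner ths).keys = PySem.Set.ofList ths := by
    simp [ctInner, PySem.Dict.keys, List.map_map, Function.comp_def]
  have hnd : (ctInner ths).keys.Nodup := by rw [hkeys]; exact PySem.Set.nodup_ofList _
  by_cases hc : c ∈ ths
  · have hcont : (ctInner ths).contains c = true := by
      rw [PySem.Dict.contains_eq_decide_mem_keys, hkeys]
      simp [PySem.Set.mem_ofList, hc]
    have hmem : (c, (PySem.List.count ths c : Int)) ∈ (ctInner ths).items := by
      simp only [ctInner]
      exact List.mem_map_of_mem ((PySem.Set.mem_ofList _ _).2 hc)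
    have hgetD : (ctInner ths).getD c 0 = (PySem.List.count ths c : Int) :=
      PySem.Dict.getD_of_mem_items _ hmem hnd 0
    apply PySem.Dict.ext
    rw [PySem.Dict.items_insert_of_contains _ _ hcont, hgetD]
    simp only [ctInner]
    rw [PySem.Set.ofList_append_singleton, PySem.Set.add_of_mem ((PySem.Set.mem_ofList _ _).2 hc), List.map_map]
    apply List.map_congr_left
    intro x hx
    by_cases hxc : x = c
    · subst hxc
      simp [PySem.List.count_eq, List.count_append]
    · simp [hxc, PySem.List.count_eq, List.count_append,
        Ne.symm hxc]
  · have hcont : (ctInner ths).contains c = false := by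
      rw [PySem.Dict.contains_eq_decide_mem_keys, hkeys]
      simp [PySem.Set.mem_ofList, hc]
    have hgetD : (ctInner ths).getD c 0 = 0 :=
      PySem.Dict.getD_of_not_contains _ 0 hcont
    apply PySem.Dict.ext
    rw [PySem.Dict.items_insert_of_not_contains _ _ hcont, hgetD]
    simp only [ctInner]
    rw [PySem.Set.ofList_append_singleton, PySem.Set.add_of_not_mem (fun h => hc ((PySem.Set.mem_ofList _ _).1 h)), List.map_append]
    congr 1
    · apply List.map_congr_left
      intro x hx
      have hxc : x ≠ c := fun h => hc (h ▸ (PySem.Set.mem_ofList _ _).1 hx)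
      simp [PySem.List.count_eq, List.count_append, Ne.symm hxc]
    · simp [PySem.List.count_eq, List.count_append, List.count_eq_zero.2 hc]

-- main invariant step
theorem ct_cf_step (ts : List (String × String × String)) (t : String × String × String) :
    ctNAdd (ctCF ts) t = ctCF (ts ++ [t]) := by
  have hth : ∀ q, ctThirds (ts ++ [t]) q
      = ctThirds ts q ++ if ctPr t = q then [ctTh t] else [] := by
    intro q
    by_cases h : ctPr t = q
    · simp [ctThirds, List.filter_append, h]
    · simp [ctThirds, List.filter_append, h]
  have hkeys : (ctCF ts).keys = PySem.Set.ofList (ts.map ctPr) := by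
    simp [ctCF, PySem.Dict.keys, List.map_map, Function.comp_def]
  have hnd : (ctCF ts).keys.Nodup := by rw [hkeys]; exact PySem.Set.nodup_ofList _
  have hmapp : (ts ++ [t]).map ctPr = ts.map ctPr ++ [ctPr t] := by simp
  by_cases hp : ctPr t ∈ ts.map ctPr
  · have hcont : (ctCF ts).contains (ctPr t) = true := by
      rw [PySem.Dict.contains_eq_decide_mem_keys, hkeys]
      simp [PySem.Set.mem_ofList, hp]
    have hmem : (ctPr t, ctInner (ctThirds ts (ctPr t))) ∈ (ctCF ts).items := by
      simp only [ctCF]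
      exact List.mem_map_of_mem ((PySem.Set.mem_ofList _ _).2 hp)
    have hgetD : (ctCF ts).getD (ctPr t) PySem.Dict.empty = ctInner (ctThirds ts (ctPr t)) :=
      PySem.Dict.getD_of_mem_items _ hmem hnd _
    apply PySem.Dict.ext
    simp only [ctNAdd]
    rw [hgetD, ct_inner_step, PySem.Dict.items_insert_of_contains _ _ hcont]
    simp only [ctCF]
    rw [hmapp, PySem.Set.ofList_append_singleton,
      PySem.Set.add_of_mem ((PySem.Set.mem_ofList _ _).2 hp), List.map_map]
    apply List.map_congr_left
    intro x hx
    by_cases hxp : x = ctPr t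
    · subst hxp
      simp [ctThirds]
    · simp [hth, hxp, Ne.symm hxp]
  · have hcont : (ctCF ts).contains (ctPr t) = false := by
      rw [PySem.Dict.contains_eq_decide_mem_keys, hkeys]
      simp [PySem.Set.mem_ofList, hp]
    have hnil : ctThirds ts (ctPr t) = [] := by
      simp only [ctThirds, List.map_eq_nil_iff]
      exact List.filter_eq_nil_iff.2 (fun x hx => by
        simp only [beq_iff_eq]
        exact fun h => hp (h ▸ List.mem_map_of_mem hx))
    apply PySem.Dict.ext
    simp only [ctNAdd]
    rw [PySem.Dict.getD_of_not_contains _ _ hcont,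
      show (PySem.Dict.empty : PySem.Dict String Int) = ctInner [] from rfl,
      ct_inner_step, PySem.Dict.items_insert_of_not_contains _ _ hcont]
    simp only [ctCF]
    rw [hmapp, PySem.Set.ofList_append_singleton,
      PySem.Set.add_of_not_mem (fun h => hp ((PySem.Set.mem_ofList _ _).1 h)),
      List.map_append, List.map_singleton]
    congr 1
    · apply List.map_congr_left
      intro x hx
      have hxp : x ≠ ctPr t := fun h => hp (h ▸ (PySem.Set.mem_ofList _ _).1 hx)
      simp [hth, Ne.symm hxp]
    · rw [hth, hnil]
      simp

theorem ct_fold_eq_cf (ts : List (String × String × String)) :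
    ts.foldl ctNAdd PySem.Dict.empty = ctCF ts := by
  induction ts using List.reverseRecOn with
  | nil => rfl
  | append_singleton ts t ih => rw [List.foldl_append, List.foldl_cons, List.foldl_nil, ih, ct_cf_step]

-- B's first pass: groups' items are the distinct pairs with their third-word streams
theorem ct_groups_items (data : List String) :
    (data.foldl (fun g d => (ctB_triples (PySem.Str.split₀ d)).foldl
        (fun g t => g.modify (ctPr t) [] (· ++ [ctTh t])) g)
      (PySem.Dict.empty : PySem.Dict (String × String) (List String))).items
    = (PySem.Set.ofList ((ctTS data).map ctPr)).map (fun p => (p, ctThirds (ctTS data) p)) := by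
  have hflat := ct_foldl_foldl_flatMap data (fun d => ctB_triples (PySem.Str.split₀ d))
    (fun g t => g.modify (ctPr t) [] (· ++ [ctTh t]))
    (PySem.Dict.empty : PySem.Dict (String × String) (List String))
  rw [hflat, show List.flatMap (fun d => ctB_triples (PySem.Str.split₀ d)) data = ctTS data from rfl]
  have hkeys : ((ctTS data).foldl (fun g t => g.modify (ctPr t) [] (· ++ [ctTh t]))
      (PySem.Dict.empty : PySem.Dict (String × String) (List String))).keys
      = PySem.Set.ofList ((ctTS data).map ctPr) := by
    rw [PySem.Dict.keys_foldl_modify_key (ctTS data) ctPr [] (fun _ t v => v ++ [ctTh t])]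
    simp [PySem.Set.update_nil_left]
  have hnd : ((ctTS data).foldl (fun g t => g.modify (ctPr t) [] (· ++ [ctTh t]))
      (PySem.Dict.empty : PySem.Dict (String × String) (List String))).keys.Nodup := by
    rw [hkeys]; exact PySem.Set.nodup_ofList _
  have hgetD : ∀ q, ((ctTS data).foldl (fun g t => g.modify (ctPr t) [] (· ++ [ctTh t]))
      (PySem.Dict.empty : PySem.Dict (String × String) (List String))).getD q []
      = ctThirds (ctTS data) q := by
    intro q
    have hmap : (ctTS data).foldl (fun g t => g.modify (ctPr t) [] (· ++ [ctTh t]))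
        (PySem.Dict.empty : PySem.Dict (String × String) (List String))
        = ((ctTS data).map (fun t => (ctPr t, ctTh t))).foldl
          (fun d p => d.modify p.1 [] (· ++ [p.2])) PySem.Dict.empty := by
      rw [List.foldl_map]
    rw [hmap, PySem.Dict.getD_foldl_modify_append]
    simp [ctThirds, List.filter_map, List.map_map, Function.comp_def]
  rw [PySem.Dict.items_eq_map_keys _ hnd [], hkeys]
  apply List.map_congr_left
  intro q hq
  rw [hgetD]

-- B's inner comprehension is ctInner
theorem ct_inner_fold (ths : List String) :
    (PySem.Set.ofList ths).foldl
      (fun d c => d.insert c ((PySem.List.count ths c : Int))) PySem.Dict.empty = ctInner ths := by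
  apply PySem.Dict.ext
  refine (PySem.Dict.items_foldl_insert_fresh (PySem.Set.ofList ths) (fun c => c)
    (fun c => (PySem.List.count ths c : Int)) PySem.Dict.empty
    (fun a _ => by simp)
    (by simp)).trans ?_
  simp [ctInner, PySem.Dict.empty]

-- B's two passes compute ctCF of the triple stream
theorem ct_B_eq_cf (data : List String) :
    createTrigrams_alt data = (ctCF (ctTS data)).items.map (fun p => (p.1.1, p.1.2, p.2.items)) := by
  show ((data.foldl (fun g d => (ctB_triples (PySem.Str.split₀ d)).foldl
        (fun g t => g.modify (ctPr t) [] (· ++ [ctTh t])) g)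
      (PySem.Dict.empty : PySem.Dict (String × String) (List String))).items.foldl
        (fun out p => out.insert p.1 ((PySem.Set.ofList p.2).foldl
          (fun d c => d.insert c ((PySem.List.count p.2 c : Int))) PySem.Dict.empty))
        PySem.Dict.empty).items.map (fun p => (p.1.1, p.1.2, p.2.items)) = _
  rw [ct_groups_items data]
  refine congrArg (List.map _) ?_
  refine (PySem.Dict.items_foldl_insert_fresh
    ((PySem.Set.ofList ((ctTS data).map ctPr)).map (fun p => (p, ctThirds (ctTS data) p)))
    Prod.fst
    (fun p => (PySem.Set.ofList p.2).foldl
      (fun d c => d.insert c ((PySem.List.count p.2 c : Int))) PySem.Dict.empty)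
    PySem.Dict.empty (fun a _ => by simp)
    (by simp [List.map_map, Function.comp_def])).trans ?_
  simp only [ctCF, List.map_map, Function.comp_def]
  apply List.map_congr_left
  intro p hp
  rw [ct_inner_fold]

-- ===== VERDICT (by name: the statement is the Claim_ definition above) =====
theorem createTrigrams_spec : Claim_equal_createTrigrams := by
  intro data _
  show createTrigrams data = createTrigrams_alt data
  rw [ct_B_eq_cf]
  unfold createTrigrams
  rw [show (fun (trigrams : PySem.Dict (String × String) (PySem.Dict String Int)) d =>
        (PySem.List.pyRange 0 (((PySem.Str.split₀ d).length : Int) - 2) 1).foldl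
          (ctA_body (PySem.Str.split₀ d)) trigrams)
      = fun tr d => (ctB_triples (PySem.Str.split₀ d)).foldl ctNAdd tr from
    funext fun tr => funext fun d => ct_range_fold _ tr]
  rw [ct_foldl_foldl_flatMap data (fun d => ctB_triples (PySem.Str.split₀ d)) ctNAdd]
  rw [ct_fold_eq_cf]
  rfl
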